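-- pv_equiv track=rewrite | github.com/DanVano/Grocery_Sense_prototype_python | src/Grocery_Sense/services/meal_suggestion_service.py | _collect_all_ingredients
-- ===== SOURCE A (Python) =====
-- from typing import Any, Dict, Iterable, List, Optional, Sequence, Tuple
--
-- def _extract_core_ingredients(recipe: Dict[str, Any]) -> List[str]:
--     ings = recipe.get("ingredients") or []
--     return [str(i).strip() for i in ings if str(i).strip()]
--
-- def _collect_all_ingredients(recipes: Sequence[Dict[str, Any]]) -> List[str]:
--     seen = set()
--     result: List[str] = []
--     for r in recipes:
--         for ing in _extract_core_ingredients(r):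
--             low = ing.lower()
--             if low not in seen:
--                 seen.add(low)
--                 result.append(low)
--     return result
-- ===== SOURCE B (Python) =====
-- from typing import Any, Dict, List, Sequence
--
-- def _extract_core_ingredients(recipe: Dict[str, Any]) -> List[str]:
--     ings = recipe.get("ingredients") or []
--     return [str(i).strip() for i in ings if str(i).strip()]
--
-- def _collect_all_ingredients(recipes: Sequence[Dict[str, Any]]) -> List[str]:
--     # Flatten first, then deduplicate by select-and-purge: repeatedly emit the
--     # current head and filter every occurrence of it out of the remainder.
--     # No seen set and no dict: correctness follows because each emitted value is
--     # the first occurrence of its class and all later occurrences are purged.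
--     flat = [ing.lower() for r in recipes for ing in _extract_core_ingredients(r)]
--     out: List[str] = []
--     while flat:
--         head = flat[0]
--         out.append(head)
--         flat = [y for y in flat if y != head]
--     return out
-- ===== Notes on version B (the rewrite author's own statement) =====
-- stated objective: alternative
-- what changed: A makes one interleaved pass keeping a seen-set and appending unseen lowercased ingredients; B flattens all lowercased core ingredients first and then deduplicates by select-and-purge (emit the head, filter all its occurrences out of the remainder) with no membership structure at all.
import Mathlib
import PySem

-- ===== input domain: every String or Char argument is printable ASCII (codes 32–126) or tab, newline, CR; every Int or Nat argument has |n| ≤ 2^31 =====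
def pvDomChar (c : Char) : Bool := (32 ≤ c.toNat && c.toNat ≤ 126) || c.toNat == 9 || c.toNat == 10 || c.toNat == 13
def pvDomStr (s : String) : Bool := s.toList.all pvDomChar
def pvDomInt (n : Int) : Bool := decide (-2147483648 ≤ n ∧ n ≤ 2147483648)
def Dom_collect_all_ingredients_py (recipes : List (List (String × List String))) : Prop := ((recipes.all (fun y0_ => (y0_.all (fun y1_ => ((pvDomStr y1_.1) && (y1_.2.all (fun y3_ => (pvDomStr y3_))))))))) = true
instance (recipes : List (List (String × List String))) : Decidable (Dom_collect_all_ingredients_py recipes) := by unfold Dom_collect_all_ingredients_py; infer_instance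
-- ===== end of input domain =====

-- B replaces A's interleaved seen-set pass with flatten-then-select-and-purge dedup (no membership structure; alternative, same result).

-- ===== PORT A =====
-- shared helper _extract_core_ingredients (identical in Source A and Source B)
def pvExtractCore (r : List (String × List String)) : List String :=
  let ings : List String :=
    match (PySem.Dict.mk r).get? "ingredients" with
    | some l => if List.isEmpty l then [] else l   -- 'or []': an empty list is falsy
    | none => []
  ings.filterMap (fun i =>
    let t := PySem.Str.strip i                -- str(i) is the identity: i is a string
    if t = "" then none else some t)

def collect_all_ingredients_py (recipes : List (List (String × List String))) : List String :=
  (recipes.foldl (fun (st : PySem.Set String × List String) r =>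
      (pvExtractCore r).foldl (fun st ing =>
        let low := PySem.Str.lower ing
        if PySem.Set.contains st.1 low then st
        else (PySem.Set.add st.1 low, st.2 ++ [low])) st)
    (PySem.Set.empty, [])).2

-- ===== PORT B =====
-- Source B's while loop: emit the head, purge all its occurrences from the remainder.
def pvPurgeLoop (flat : List String) (out : List String) : List String :=
  match flat with
  | [] => out
  | x :: xs => pvPurgeLoop ((x :: xs).filter (fun y => y != x)) (out ++ [x])
termination_by flat.length
decreasing_by
  simp only [List.filter_cons, bne_self_eq_false, Bool.false_eq_true, if_false, List.length_cons]
  exact Nat.lt_succ_of_le (List.length_filter_le _ _)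

def collect_all_ingredients_py_alt (recipes : List (List (String × List String))) : List String :=
  let flat := recipes.flatMap (fun r => (pvExtractCore r).map PySem.Str.lower)
  pvPurgeLoop flat []

-- ===== PRECONDITION & SPEC =====
def Spec_collect_all_ingredients_py (recipes : List (List (String × List String))) (out : List String) : Prop := out = collect_all_ingredients_py_alt recipes
instance (recipes : List (List (String × List String))) (out : List String) : Decidable (Spec_collect_all_ingredients_py recipes out) := by unfold Spec_collect_all_ingredients_py; infer_instance

-- ===== CLAIM (what is proved, stated in full; the proofs are below) =====
def Claim_equal_collect_all_ingredients_py : Prop := ∀ (recipes : List (List (String × List String))), Dom_collect_all_ingredients_py recipes → Spec_collect_all_ingredients_py recipes (collect_all_ingredients_py recipes)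

-- ===== LEMMAS AND PROOFS =====

-- A's inner loop, started in a state whose seen set and result list coincide, acts as foldl Set.add on both components.
lemma inner_loop_add (ys : List String) (s : List String) :
    ys.foldl (fun (st : PySem.Set String × List String) ing =>
        let low := PySem.Str.lower ing
        if PySem.Set.contains st.1 low then st
        else (PySem.Set.add st.1 low, st.2 ++ [low])) (s, s)
      = ((ys.map PySem.Str.lower).foldl PySem.Set.add s,
         (ys.map PySem.Str.lower).foldl PySem.Set.add s) := by
  induction ys generalizing s with
  | nil => rfl
  | cons y ys ih =>
      simp only [List.foldl_cons, List.map_cons]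
      by_cases h : PySem.Set.contains s (PySem.Str.lower y)
      · simp only [h, if_pos, PySem.Set.add]
        exact ih s
      · simp only [h, PySem.Set.add, if_false, Bool.false_eq_true]
        exact ih (s ++ [PySem.Str.lower y])

-- A's whole nested loop equals foldl Set.add over the flattened, lowercased list.
lemma outer_loop_add (recipes : List (List (String × List String))) (s : List String) :
    recipes.foldl (fun (st : PySem.Set String × List String) r =>
        (pvExtractCore r).foldl (fun st ing =>
          let low := PySem.Str.lower ing
          if PySem.Set.contains st.1 low then st
          else (PySem.Set.add st.1 low, st.2 ++ [low])) st) (s, s)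
      = ((recipes.flatMap (fun r => (pvExtractCore r).map PySem.Str.lower)).foldl PySem.Set.add s,
         (recipes.flatMap (fun r => (pvExtractCore r).map PySem.Str.lower)).foldl PySem.Set.add s) := by
  induction recipes generalizing s with
  | nil => rfl
  | cons r rs ih =>
      simp only [List.foldl_cons, List.flatMap_cons, List.foldl_append]
      rw [inner_loop_add]
      exact ih _

-- ofList commutes with purging one value (filtering ≠ x) — the key fact behind select-and-purge.
lemma ofList_filter_ne (xs : List String) (x : String) :
    PySem.Set.ofList (xs.filter (fun y => y != x)) = PySem.Set.discard (PySem.Set.ofList xs) x := by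
  induction xs with
  | nil => rfl
  | cons a xs ih =>
      by_cases h : a = x
      · subst h
        simp only [List.filter_cons, bne_self_eq_false, Bool.false_eq_true, if_false, ih,
          PySem.Set.ofList_cons, PySem.Set.discard, List.filter_cons, bne_self_eq_false,
          Bool.false_eq_true, if_false, List.filter_filter]
        simp [Bool.and_self]
      · simp only [List.filter_cons, bne_iff_ne, ne_eq, h, not_false_eq_true, if_pos,
          PySem.Set.ofList_cons, ih, PySem.Set.discard, List.filter_cons, List.filter_filter]
        have hx : (!a == x) = true := by simp [h]
        rw [hx]
        simp only [if_pos]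
        congr 1
        exact List.filter_congr (fun a _ => Bool.and_comm _ _)
  
-- B's purge loop computes out ++ set(flat) (first occurrences in order).
lemma pvPurgeLoop_spec (flat : List String) (out : List String) :
    pvPurgeLoop flat out = out ++ PySem.Set.ofList flat := by
  induction hn : flat.length using Nat.strong_induction_on generalizing flat out with
  | _ n ih =>
    match flat with
    | [] => simp [pvPurgeLoop, PySem.Set.ofList_nil]
    | x :: xs =>
      rw [pvPurgeLoop]
      have hf : (x :: xs).filter (fun y => y != x) = xs.filter (fun y => y != x) := by
        simp
      have hlt : ((x :: xs).filter (fun y => y != x)).length < n := by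
        rw [hf]; subst hn
        exact Nat.lt_succ_of_le (List.length_filter_le _ _)
      rw [ih _ hlt _ _ rfl]
      rw [hf, ofList_filter_ne, PySem.Set.ofList_cons, List.append_assoc]
      rfl

-- ===== VERDICT (by name: the statement is the Claim_ definition above) =====
theorem collect_all_ingredients_py_spec : Claim_equal_collect_all_ingredients_py := by
  intro recipes _
  unfold Spec_collect_all_ingredients_py collect_all_ingredients_py collect_all_ingredients_py_alt
  rw [show (PySem.Set.empty (α := String), ([] : List String)) = (([] : List String), ([] : List String)) from rfl]
  rw [outer_loop_add, pvPurgeLoop_spec, PySem.Set.ofList_eq_foldl]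
  rfl
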